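-- pv_equiv track=rewrite | github.com/immerzu/QTranslate_diss | scripts/trace_qtranslate_popup_render.py | text_index_to_cp
-- ===== SOURCE A (Python) =====
-- def text_index_to_cp(text: str, target_index: int) -> int:
--     text_index = 0
--     cp = 0
--     target_index = max(0, min(target_index, len(text)))
--     while text_index < target_index:
--         if text[text_index] == "\r":
--             cp += 1
--             text_index += 1
--             if text_index < target_index and text[text_index] == "\n":
--                 text_index += 1
--             continue
--         cp += 1
--         text_index += 1
--     return cp
-- ===== SOURCE B (Python) =====
-- def text_index_to_cp(text: str, target_index: int) -> int:
--     target_index = max(0, min(target_index, len(text)))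
--     return target_index - text[:target_index].count("\r\n")
-- ===== Notes on version B (the rewrite author's own statement) =====
-- stated objective: simpler
-- what changed: Replaces the character-by-character while loop with arithmetic: the answer is the clamped index minus the number of CR-LF pairs in the prefix, obtained with one str.count call.
import Mathlib
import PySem

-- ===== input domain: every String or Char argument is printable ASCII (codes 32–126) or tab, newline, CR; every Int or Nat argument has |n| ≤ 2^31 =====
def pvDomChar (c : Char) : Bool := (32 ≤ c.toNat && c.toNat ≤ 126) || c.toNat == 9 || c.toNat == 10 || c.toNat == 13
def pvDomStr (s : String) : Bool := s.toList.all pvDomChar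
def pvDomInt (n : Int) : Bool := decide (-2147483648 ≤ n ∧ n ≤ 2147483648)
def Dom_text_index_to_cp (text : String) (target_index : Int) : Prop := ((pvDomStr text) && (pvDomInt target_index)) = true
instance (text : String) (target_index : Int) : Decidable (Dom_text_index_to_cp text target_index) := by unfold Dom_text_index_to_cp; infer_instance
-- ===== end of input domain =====

-- B replaces A's character-by-character while loop by arithmetic: clamped index minus the
-- number of "\r\n" pairs in the clamped prefix (objective: simpler).

-- ===== PORT A =====
-- A's while loop over (text_index, cp); getD is exact here because every index read is < target ≤ length.
def pvALoop (chars : List Char) (target ti cp : Nat) : Nat :=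
  if ti < target then
    if chars.getD ti ' ' = '\r' then
      if ti + 1 < target ∧ chars.getD (ti + 1) ' ' = '\n' then
        pvALoop chars target (ti + 2) (cp + 1)
      else
        pvALoop chars target (ti + 1) (cp + 1)
    else
      pvALoop chars target (ti + 1) (cp + 1)
  else cp
termination_by target - ti

def text_index_to_cp (text : String) (target_index : Int) : Int :=
  let target : Int := max 0 (min target_index (PySem.Str.len text))
  (pvALoop text.toList target.toNat 0 0 : Int)

-- ===== PORT B =====
def text_index_to_cp_alt (text : String) (target_index : Int) : Int :=
  let n : Int := max 0 (min target_index (PySem.Str.len text))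
  n - (PySem.Str.count (PySem.Str.slice text none (some n)) "\r\n" : Int)

-- ===== PRECONDITION & SPEC =====
def Spec_text_index_to_cp (text : String) (target_index : Int) (out : Int) : Prop := out = text_index_to_cp_alt text target_index
instance (text : String) (target_index : Int) (out : Int) : Decidable (Spec_text_index_to_cp text target_index out) := by unfold Spec_text_index_to_cp; infer_instance

-- ===== CLAIM (what is proved, stated in full; the proofs are below) =====
def Claim_equal_text_index_to_cp : Prop := ∀ (text : String) (target_index : Int), Dom_text_index_to_cp text target_index → Spec_text_index_to_cp text target_index (text_index_to_cp text target_index)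

-- ===== LEMMAS AND PROOFS =====

-- number of disjoint "\r\n" pairs, scanning left to right (proof-side characterisation)
def pvCrlf : List Char → Nat
  | a :: b :: t => if a = '\r' ∧ b = '\n' then pvCrlf t + 1 else pvCrlf (b :: t)
  | _ => 0

theorem pvCrlf_nil : pvCrlf [] = 0 := rfl

theorem pvCrlf_single (a : Char) : pvCrlf [a] = 0 := rfl

theorem pvCrlf_crlf (t : List Char) : pvCrlf ('\r' :: '\n' :: t) = pvCrlf t + 1 := by
  rw [pvCrlf, if_pos ⟨rfl, rfl⟩]

theorem pvCrlf_cons₂ (a b : Char) (t : List Char) (h : ¬(a = '\r' ∧ b = '\n')) :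
    pvCrlf (a :: b :: t) = pvCrlf (b :: t) := by
  rw [pvCrlf, if_neg h]

theorem pvCrlf_cons_ne (a : Char) (t : List Char) (h : a ≠ '\r') :
    pvCrlf (a :: t) = pvCrlf t := by
  match t with
  | [] => rw [pvCrlf_single, pvCrlf_nil]
  | b :: u => exact pvCrlf_cons₂ a b u (fun hc => h hc.1)

theorem pvALoop_key : ∀ (k : Nat) (l : List Char) (target ti cp : Nat),
    target ≤ l.length → target = ti + k →
    pvALoop l target ti cp + pvCrlf ((l.drop ti).take k) = cp + k := by
  intro k
  induction k using Nat.strong_induction_on with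
  | _ k ih =>
    intro l target ti cp hlen htar
    match k with
    | 0 =>
      rw [pvALoop]
      simp [htar, pvCrlf_nil]
    | Nat.succ k' =>
      have hti : ti < l.length := by omega
      have hdrop : l.drop ti = l[ti] :: l.drop (ti + 1) := List.drop_eq_getElem_cons hti
      have hgd : l.getD ti ' ' = l[ti] := by
        simp [List.getD_eq_getElem?_getD, List.getElem?_eq_getElem hti]
      rw [pvALoop]
      by_cases hr : l[ti] = '\r'
      · by_cases hsk : ti + 1 < target ∧ l.getD (ti + 1) ' ' = '\n'
        · -- CR followed by LF inside the window: consume both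
          have hti1 : ti + 1 < l.length := by omega
          have hdrop1 : l.drop (ti + 1) = l[ti + 1] :: l.drop (ti + 2) :=
            List.drop_eq_getElem_cons hti1
          have hgd1 : l.getD (ti + 1) ' ' = l[ti + 1] := by
            simp [List.getD_eq_getElem?_getD, List.getElem?_eq_getElem hti1]
          have hn : l[ti + 1] = '\n' := by rw [← hgd1]; exact hsk.2
          have hk1 : 1 ≤ k' := by omega
          have hIH := ih (k' - 1) (by omega) l target (ti + 2) (cp + 1) hlen (by omega)
          simp only [if_pos (show ti < target by omega), hgd, if_pos hr, if_pos hsk]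
          rw [hdrop, hdrop1, hr, hn]
          have hk'' : k' = (k' - 1) + 1 := by omega
          rw [hk'']
          simp only [List.take_succ_cons]
          rw [pvCrlf_crlf]
          omega
        · -- lone CR (or CR at the window edge)
          have hIH := ih k' (by omega) l target (ti + 1) (cp + 1) hlen (by omega)
          simp only [if_pos (show ti < target by omega), hgd, if_pos hr, if_neg hsk]
          rw [hdrop, hr]
          simp only [List.take_succ_cons]
          have hrw : pvCrlf ('\r' :: (l.drop (ti + 1)).take k') = pvCrlf ((l.drop (ti + 1)).take k') := by
            match hk : k' with
            | 0 => simp [pvCrlf_single, pvCrlf_nil]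
            | Nat.succ m =>
              have ht1 : ti + 1 < target := by omega
              have hti1 : ti + 1 < l.length := by omega
              have hdrop1 : l.drop (ti + 1) = l[ti + 1] :: l.drop (ti + 2) :=
                List.drop_eq_getElem_cons hti1
              have hgd1 : l.getD (ti + 1) ' ' = l[ti + 1] := by
                simp [List.getD_eq_getElem?_getD, List.getElem?_eq_getElem hti1]
              have hb : l[ti + 1] ≠ '\n' := by
                intro hc
                exact hsk ⟨ht1, by rw [hgd1, hc]⟩
              rw [hdrop1]
              simp only [List.take_succ_cons]
              exact pvCrlf_cons₂ _ _ _ (fun hc => hb hc.2)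
          rw [hrw]
          omega
      · -- ordinary character
        have hIH := ih k' (by omega) l target (ti + 1) (cp + 1) hlen (by omega)
        simp only [if_pos (show ti < target by omega), hgd, if_neg hr]
        rw [hdrop]
        simp only [List.take_succ_cons]
        rw [pvCrlf_cons_ne _ _ hr]
        omega

theorem pvCount_go_eq : ∀ (fuel : Nat) (l : List Char) (acc : Nat), l.length ≤ fuel →
    PySem.Chars.count.go ['\r', '\n'] fuel l acc = acc + pvCrlf l := by
  intro fuel
  induction fuel using Nat.strong_induction_on with
  | _ fuel ih =>
    intro l acc hlen
    match fuel, l with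
    | 0, l =>
      have : l = [] := by simpa using hlen
      subst this
      rw [PySem.Chars.count.go.eq_def]
      simp [pvCrlf_nil]
    | Nat.succ f, [] =>
      rw [PySem.Chars.count.go.eq_def]
      simp [pvCrlf_nil]
    | Nat.succ f, a :: t =>
      rw [PySem.Chars.count.go.eq_def]
      simp only []
      by_cases hp : List.isPrefixOf ['\r', '\n'] (a :: t) = true
      · rw [if_pos hp]
        match t with
        | [] => simp [List.isPrefixOf] at hp
        | b :: u =>
          have hab : a = '\r' ∧ b = '\n' := by
            simp [List.isPrefixOf] at hp
            exact ⟨hp.1.symm, hp.2.symm⟩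
          have hd : List.drop (['\r', '\n'] : List Char).length (a :: b :: u) = u := rfl
          rw [hd, ih f (by omega) u (acc + 1) (by simp at hlen ⊢; omega)]
          rw [hab.1, hab.2, pvCrlf_crlf]
          omega
      · rw [if_neg hp]
        rw [ih f (by omega) t acc (by simp at hlen; omega)]
        match t with
        | [] => rw [pvCrlf_single, pvCrlf_nil]
        | b :: u =>
          have hne : ¬(a = '\r' ∧ b = '\n') := by
            intro h
            apply hp
            simp [List.isPrefixOf, h.1, h.2]
          rw [pvCrlf_cons₂ _ _ _ hne]

-- ===== VERDICT (by name: the statement is the Claim_ definition above) =====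
theorem text_index_to_cp_spec : Claim_equal_text_index_to_cp := by
  intro text target_index _
  unfold Spec_text_index_to_cp text_index_to_cp text_index_to_cp_alt
  simp only []
  set L := text.toList with hL
  set n : Int := max 0 (min target_index (PySem.Str.len text)) with hn
  have hlen : PySem.Str.len text = (L.length : Int) := by
    simp [PySem.Str.len_eq, hL]
  have h0 : 0 ≤ n := by simp [hn]
  have hle : n ≤ (L.length : Int) := by
    rw [hn, hlen]
    omega
  have hnt : n.toNat ≤ L.length := by omega
  have hA := pvALoop_key n.toNat L n.toNat 0 0 hnt (by omega)
  simp only [List.drop_zero] at hA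
  have hslice : (PySem.Str.slice text none (some n)).toList = L.take n.toNat := by
    rw [PySem.Str.toList_slice]
    simp only [PySem.Chars.slice_eq_listSlice]
    exact PySem.List.slice_to L h0
  have hcount : PySem.Str.count (PySem.Str.slice text none (some n)) "\r\n"
      = pvCrlf (L.take n.toNat) := by
    rw [PySem.Str.count_eq, hslice]
    have hsub : ("\r\n" : String).toList = ['\r', '\n'] := by decide
    rw [hsub]
    unfold PySem.Chars.count
    rw [if_neg (by simp)]
    rw [pvCount_go_eq (L.take n.toNat).length (L.take n.toNat) 0 le_rfl]
    omega
  rw [hcount]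
  omega
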